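-- pv_equiv track=rewrite | github.com/Chogyuwon/RumourEval | data_process.py | twitter_reddit_split
-- ===== SOURCE A (Python) =====
-- def twitter_reddit_split(ids):
--     twit_ids = []
--     redit_ids = []
--     for id in ids:
--         if len(id) == 18:
--             twit_ids.append(id)
--         elif len(id) > 1:
--             redit_ids.append(id)
--         else:
--             return ValueError
--     return twit_ids, redit_ids
-- ===== SOURCE B (Python) =====
-- def twitter_reddit_split(ids):
--     if any(len(x) <= 1 for x in ids):
--         return ValueError
--     twit_ids = [x for x in ids if len(x) == 18]
--     redit_ids = [x for x in ids if len(x) != 18]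
--     return twit_ids, redit_ids
-- ===== Notes on version B (the rewrite author's own statement) =====
-- stated objective: simpler
-- what changed: Replaces the fused single loop with early return by a short-circuiting validation scan followed by two independent filter passes building each output list separately.
import Mathlib
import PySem

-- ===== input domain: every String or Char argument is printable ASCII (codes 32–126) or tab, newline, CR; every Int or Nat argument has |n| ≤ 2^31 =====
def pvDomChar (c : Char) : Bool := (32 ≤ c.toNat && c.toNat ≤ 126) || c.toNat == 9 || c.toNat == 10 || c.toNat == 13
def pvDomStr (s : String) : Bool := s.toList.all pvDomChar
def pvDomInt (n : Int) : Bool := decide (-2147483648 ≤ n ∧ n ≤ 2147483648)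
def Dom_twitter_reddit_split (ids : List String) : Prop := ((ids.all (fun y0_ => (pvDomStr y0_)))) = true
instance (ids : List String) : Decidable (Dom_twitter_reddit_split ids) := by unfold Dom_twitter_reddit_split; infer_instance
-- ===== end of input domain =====

-- B replaces A's fused loop (with early return) by a validation scan plus two filter passes; objective: simpler.
-- On lists containing an id of length ≤ 1 both Pythons return the class ValueError (not a tuple); Pre_ excludes those.

-- ===== PORT A =====
-- A's single loop, carried as a recursion over ids with the two accumulators;
-- the `else return ValueError` branch returns a value not of the declared type (outside Pre_), rendered as ([], []).
def twrsLoopA : List String → List String → List String → List String × List String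
  | [], twit, redit => (twit, redit)
  | id :: rest, twit, redit =>
    if PySem.Str.len id = 18 then twrsLoopA rest (twit ++ [id]) redit
    else if PySem.Str.len id > 1 then twrsLoopA rest twit (redit ++ [id])
    else (twit, redit)

def twitter_reddit_split (ids : List String) : List String × List String :=
  twrsLoopA ids [] []

-- ===== PORT B =====
-- validation scan, then two independent filters; the ValueError return (outside Pre_) is rendered as ([], []).
def twitter_reddit_split_alt (ids : List String) : List String × List String :=
  if ids.any (fun x => PySem.Str.len x ≤ 1) then ([], [])
  else (ids.filter (fun x => PySem.Str.len x = 18),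
        ids.filter (fun x => PySem.Str.len x ≠ 18))

-- ===== PRECONDITION & SPEC =====
-- Pre_ excludes lists containing an id of length ≤ 1: there A (and B) return the class ValueError itself,
-- which is not a value of the declared tuple type.
def Pre_twitter_reddit_split (ids : List String) : Prop := ∀ x ∈ ids, 1 < PySem.Str.len x
instance (ids : List String) : Decidable (Pre_twitter_reddit_split ids) := by unfold Pre_twitter_reddit_split; infer_instance
def pvWitness_twitter_reddit_split : List String := ["ab", "123456789012345678", "xyz"]

def Spec_twitter_reddit_split (ids : List String) (out : List String × List String) : Prop := out = twitter_reddit_split_alt ids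
instance (ids : List String) (out : List String × List String) : Decidable (Spec_twitter_reddit_split ids out) := by unfold Spec_twitter_reddit_split; infer_instance

-- ===== CLAIM (what is proved, stated in full; the proofs are below) =====
def Claim_equal_twitter_reddit_split : Prop := ∀ (ids : List String), Dom_twitter_reddit_split ids → Pre_twitter_reddit_split ids → Spec_twitter_reddit_split ids (twitter_reddit_split ids)

-- ===== LEMMAS AND PROOFS =====

lemma twrsLoopA_acc (ids : List String) (h : ∀ x ∈ ids, 1 < PySem.Str.len x) :
    ∀ twit redit, twrsLoopA ids twit redit =
      (twit ++ ids.filter (fun x => PySem.Str.len x = 18),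
       redit ++ ids.filter (fun x => PySem.Str.len x ≠ 18)) := by
  induction ids with
  | nil => intro twit redit; simp [twrsLoopA]
  | cons id rest ih =>
    intro twit redit
    have hid : 1 < PySem.Str.len id := h id (by simp)
    have hrest : ∀ x ∈ rest, 1 < PySem.Str.len x := fun x hx => h x (by simp [hx])
    simp only [PySem.Str.len] at hid
    by_cases h18 : (id.length : Int) = 18
    · simp [twrsLoopA, PySem.Str.len, h18, ih hrest, List.filter]
    · have hid' : 1 < id.length := by simpa using hid
      simp [twrsLoopA, PySem.Str.len, h18, hid', ih hrest, List.filter]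

theorem twitter_reddit_split_spec : Claim_equal_twitter_reddit_split := by
  intro ids _ hpre
  unfold Spec_twitter_reddit_split twitter_reddit_split twitter_reddit_split_alt
  have hguard : ids.any (fun x => PySem.Str.len x ≤ 1) = false := by
    simp only [List.any_eq_false, decide_eq_true_eq]
    intro x hx
    exact not_le.mpr (hpre x hx)
  rw [hguard, twrsLoopA_acc ids hpre]
  simp
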